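-- pv_equiv track=rewrite | github.com/cdccmmschennai-collab/Spir_Enterprise | backend/extraction/spir_detector.py | _heuristic_detect
-- ===== SOURCE A (Python) =====
-- def _heuristic_detect(sheet_names: list[str]) -> str:
--     """Fall-back heuristic based on sheet names alone."""
--     names_lower = [s.lower() for s in sheet_names]
--
--     # FORMAT8: "main sheet N (CATEGORY)"
--     categorised = [n for n in names_lower
--                    if "main sheet" in n and "(" in n]
--     if len(categorised) >= 2:
--         return "FORMAT8"
--
--     # FORMAT7: "main sheet 1", "main sheet 2"
--     numbered = [n for n in names_lower
--                 if "main sheet" in n and n.replace("main sheet", "").strip().isdigit()]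
--     if len(numbered) >= 2:
--         return "FORMAT7"
--
--     # FORMAT5: multiple continuation sheets
--     cont = [n for n in names_lower if "continuation" in n]
--     if len(cont) >= 2:
--         return "FORMAT5"
--
--     # FORMAT4/6: single continuation
--     if len(cont) == 1:
--         return "FORMAT6"
--
--     # FORMAT1: annexure sheets
--     if any("annexure" in n for n in names_lower):
--         return "FORMAT1"
--
--     if len(sheet_names) == 1:
--         return "FORMAT2"
--
--     return "FORMAT_ADAPTIVE"
-- ===== SOURCE B (Python) =====
-- def _heuristic_detect(sheet_names: list[str]) -> str:
--     """Fall-back heuristic based on sheet names alone: one scan that lowers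
--     each name once, threads four tallies, and exits early with FORMAT8 the
--     moment two categorised sheets have been seen (that test has top priority
--     and its tally can only grow); the rest of the cascade runs at the end."""
--     cat = num = cont = 0
--     annex = False
--     i = 0
--     while True:
--         if cat >= 2:
--             return "FORMAT8"
--         if i == len(sheet_names):
--             break
--         n = sheet_names[i].lower()
--         ms = "main sheet" in n
--         cat += 1 if ms and "(" in n else 0
--         num += 1 if ms and n.replace("main sheet", "").strip().isdigit() else 0
--         cont += 1 if "continuation" in n else 0
--         annex = annex or "annexure" in n
--         i += 1
--     if num >= 2:
--         return "FORMAT7"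
--     if cont >= 2:
--         return "FORMAT5"
--     if cont == 1:
--         return "FORMAT6"
--     if annex:
--         return "FORMAT1"
--     if len(sheet_names) == 1:
--         return "FORMAT2"
--     return "FORMAT_ADAPTIVE"
-- ===== Notes on version B (the rewrite author's own statement) =====
-- stated objective: alternative
-- what changed: Replaces A's four staged comprehension passes over the lowered list and its return cascade with a single short-circuiting scan: each name is lowered once, four tallies are threaded through the loop, the scan returns FORMAT8 early as soon as the categorised tally reaches 2 (the dominant test, whose tally is monotone) without looking at the remaining names, and only the residual cascade runs after the scan.
import Mathlib
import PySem

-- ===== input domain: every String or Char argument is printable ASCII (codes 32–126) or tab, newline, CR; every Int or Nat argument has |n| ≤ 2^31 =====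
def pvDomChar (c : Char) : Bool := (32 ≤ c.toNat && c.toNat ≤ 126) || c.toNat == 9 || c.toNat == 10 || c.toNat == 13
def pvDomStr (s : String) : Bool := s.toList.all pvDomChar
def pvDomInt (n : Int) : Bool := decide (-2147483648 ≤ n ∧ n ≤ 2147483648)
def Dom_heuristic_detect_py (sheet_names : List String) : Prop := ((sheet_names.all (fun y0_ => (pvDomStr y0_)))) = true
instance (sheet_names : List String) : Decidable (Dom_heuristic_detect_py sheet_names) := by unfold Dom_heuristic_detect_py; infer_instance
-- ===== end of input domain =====

-- B replaces A’s four staged comprehension passes with one short-circuiting scan threading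
-- four tallies and returning FORMAT8 early once the categorised tally reaches 2; same return value.

-- ===== PORT A =====
def heuristic_detect_py (sheet_names : List String) : String :=
  let names_lower := sheet_names.map PySem.Str.lower
  let categorised := names_lower.filter
    (fun n => PySem.Str.isIn "main sheet" n && PySem.Str.isIn "(" n)
  if 2 ≤ categorised.length then "FORMAT8" else
  let numbered := names_lower.filter
    (fun n => PySem.Str.isIn "main sheet" n &&
      PySem.Str.strIsdigit (PySem.Str.strip (PySem.Str.replace n "main sheet" "")))
  if 2 ≤ numbered.length then "FORMAT7" else
  let cont := names_lower.filter (fun n => PySem.Str.isIn "continuation" n)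
  if 2 ≤ cont.length then "FORMAT5" else
  if cont.length = 1 then "FORMAT6" else
  if names_lower.any (fun n => PySem.Str.isIn "annexure" n) then "FORMAT1" else
  if sheet_names.length = 1 then "FORMAT2" else
  "FORMAT_ADAPTIVE"

-- ===== PORT B =====
-- Source B’s while loop as structural recursion: the early-exit test precedes consuming the next name;
-- `total` is len(sheet_names) read by the loop and the cascade
def hdGo (total : Int) (names : List String) (cat num cont : Int) (annex : Bool) : String :=
  if 2 ≤ cat then "FORMAT8" else
  match names with
  | [] =>
    if 2 ≤ num then "FORMAT7" else
    if 2 ≤ cont then "FORMAT5" else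
    if cont = 1 then "FORMAT6" else
    if annex then "FORMAT1" else
    if total = 1 then "FORMAT2" else
    "FORMAT_ADAPTIVE"
  | s :: rest =>
    let n := PySem.Str.lower s
    let ms := PySem.Str.isIn "main sheet" n
    hdGo total rest
      (cat + (if ms && PySem.Str.isIn "(" n then 1 else 0))
      (num + (if ms && PySem.Str.strIsdigit (PySem.Str.strip (PySem.Str.replace n "main sheet" "")) then 1 else 0))
      (cont + (if PySem.Str.isIn "continuation" n then 1 else 0))
      (annex || PySem.Str.isIn "annexure" n)

def heuristic_detect_py_alt (sheet_names : List String) : String :=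
  hdGo (sheet_names.length : Int) sheet_names 0 0 0 false

-- ===== PRECONDITION & SPEC =====
def Spec_heuristic_detect_py (sheet_names : List String) (out : String) : Prop := out = heuristic_detect_py_alt sheet_names
instance (sheet_names : List String) (out : String) : Decidable (Spec_heuristic_detect_py sheet_names out) := by unfold Spec_heuristic_detect_py; infer_instance

-- ===== CLAIM =====
def Claim_equal_heuristic_detect_py : Prop := ∀ (sheet_names : List String), Dom_heuristic_detect_py sheet_names → Spec_heuristic_detect_py sheet_names (heuristic_detect_py sheet_names)

-- ===== LEMMAS AND PROOFS =====
-- characterisation of hdGo: it computes the full cascade over the totals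
theorem hdGo_eq (total : Int) (l : List String) (cat num cont : Int) (annex : Bool) :
    hdGo total l cat num cont annex =
      (if 2 ≤ cat + ((l.map PySem.Str.lower).countP
              (fun n => PySem.Str.isIn "main sheet" n && PySem.Str.isIn "(" n) : Int)
       then "FORMAT8" else
       if 2 ≤ num + ((l.map PySem.Str.lower).countP
              (fun n => PySem.Str.isIn "main sheet" n &&
                PySem.Str.strIsdigit (PySem.Str.strip (PySem.Str.replace n "main sheet" ""))) : Int)
       then "FORMAT7" else
       if 2 ≤ cont + ((l.map PySem.Str.lower).countP
              (fun n => PySem.Str.isIn "continuation" n) : Int)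
       then "FORMAT5" else
       if cont + ((l.map PySem.Str.lower).countP
              (fun n => PySem.Str.isIn "continuation" n) : Int) = 1
       then "FORMAT6" else
       if annex || (l.map PySem.Str.lower).any (fun n => PySem.Str.isIn "annexure" n)
       then "FORMAT1" else
       if total = 1 then "FORMAT2" else
       "FORMAT_ADAPTIVE") := by
  induction l generalizing cat num cont annex with
  | nil =>
    simp only [hdGo, List.map_nil, List.countP_nil, List.any_nil, Bool.or_false,
      Nat.cast_zero, add_zero]
  | cons h t ih =>
    rw [hdGo]
    by_cases hc : 2 ≤ cat
    · rw [if_pos hc]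
      split_ifs <;> first | rfl | omega
    · rw [if_neg hc, ih]
      simp only [List.map_cons, List.countP_cons, List.any_cons, Nat.cast_add,
        Nat.cast_ite, Nat.cast_one, Nat.cast_zero]
      refine if_congr (by omega) rfl (if_congr (by omega) rfl (if_congr (by omega) rfl
        (if_congr (by omega) rfl (if_congr ?_ rfl (if_congr Iff.rfl rfl rfl)))))
      simp [Bool.or_assoc]

-- ===== VERDICT =====
theorem heuristic_detect_py_spec : Claim_equal_heuristic_detect_py := by
  intro sheet_names _
  show heuristic_detect_py sheet_names = heuristic_detect_py_alt sheet_names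
  unfold heuristic_detect_py heuristic_detect_py_alt
  rw [hdGo_eq]
  simp only [List.countP_eq_length_filter, zero_add, Bool.false_or]
  norm_num
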